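-- pv_equiv track=rewrite | github.com/AllenNeuralDynamics/aind-SmartSPIM-segmentation | code/src/aind_smartspim_segmentation/chunked_segmentation.py | calculate_offsets
-- ===== SOURCE A (Python) =====
-- def calculate_offsets(blocks, chunk_size):
--     """
--     creates list of offsets for each chunk based on its location
--     in the dask array
--
--     Parameters
--     ----------
--     blocks : tuple
--         The number of blocks in each direction (z, col, row)
--
--     chunk_size : tuple
--         The number of values along each dimention of a chunk (z, col, row)
--
--     Return
--     ------
--     offests: list
--         The offsets of each block in "C order
--     """
--     offsets = []
--     for dv in range(blocks[0]):
--         for ap in range(blocks[1]):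
--             for ml in range(blocks[2]):
--                 offsets.append(
--                     [
--                         chunk_size[2] * ml,
--                         chunk_size[1] * ap,
--                         chunk_size[0] * dv,
--                     ]
--                 )
--     return offsets
-- ===== SOURCE B (Python) =====
-- def calculate_offsets(blocks, chunk_size):
--     plane = blocks[1] * blocks[2]
--     return [
--         [
--             chunk_size[2] * (i % blocks[2]),
--             chunk_size[1] * (i // blocks[2] % blocks[1]),
--             chunk_size[0] * (i // plane),
--         ]
--         for i in range(blocks[0] * plane)
--     ]
-- ===== Notes on version B (the rewrite author's own statement) =====
-- stated objective: alternative
-- what changed: Replaces the triple-nested Cartesian loops with a single flat pass over range(blocks[0]*blocks[1]*blocks[2]), recovering the three coordinates of each offset by divmod index arithmetic; Pre_ excludes block triples with a negative count whose product is positive (exactly two negatives), where A's empty result is only an accident of empty range(); block counts are naturally nonnegative.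
-- outside the precondition, e.g. on calculate_offsets((-1, -1, 2), (1, 1, 1)): A returns [], B returns [[0, 0, 0], [1, 0, -1]]
import Mathlib
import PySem

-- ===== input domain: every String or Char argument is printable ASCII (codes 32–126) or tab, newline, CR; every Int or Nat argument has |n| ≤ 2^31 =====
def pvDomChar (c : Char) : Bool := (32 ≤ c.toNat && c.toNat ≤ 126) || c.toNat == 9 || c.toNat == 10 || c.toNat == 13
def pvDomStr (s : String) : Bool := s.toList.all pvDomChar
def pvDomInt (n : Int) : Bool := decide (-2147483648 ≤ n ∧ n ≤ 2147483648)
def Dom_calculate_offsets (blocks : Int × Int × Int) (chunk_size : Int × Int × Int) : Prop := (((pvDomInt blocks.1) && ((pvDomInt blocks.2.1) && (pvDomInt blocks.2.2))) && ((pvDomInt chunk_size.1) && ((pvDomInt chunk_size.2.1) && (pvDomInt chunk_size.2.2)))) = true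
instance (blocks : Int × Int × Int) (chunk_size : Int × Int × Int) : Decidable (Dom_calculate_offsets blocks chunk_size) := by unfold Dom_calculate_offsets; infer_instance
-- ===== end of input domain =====

-- B replaces A's triple-nested loops by one flat loop with divmod index arithmetic (alternative decomposition, same cost).
-- ===== PORT A =====
def calculate_offsets (blocks : Int × Int × Int) (chunk_size : Int × Int × Int) : List (List Int) :=
  (PySem.List.pyRange 0 blocks.1 1).foldl (fun offsets dv =>
    (PySem.List.pyRange 0 blocks.2.1 1).foldl (fun offsets ap =>
      (PySem.List.pyRange 0 blocks.2.2 1).foldl (fun offsets ml =>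
        offsets ++ [[chunk_size.2.2 * ml, chunk_size.2.1 * ap, chunk_size.1 * dv]])
        offsets)
      offsets)
    []

-- ===== PORT B =====
def calculate_offsets_alt (blocks : Int × Int × Int) (chunk_size : Int × Int × Int) : List (List Int) :=
  let plane : Int := blocks.2.1 * blocks.2.2
  (PySem.List.pyRange 0 (blocks.1 * plane) 1).map (fun i =>
    [chunk_size.2.2 * PySem.Int.mod i blocks.2.2,
     chunk_size.2.1 * PySem.Int.mod (PySem.Int.floordiv i blocks.2.2) blocks.2.1,
     chunk_size.1 * PySem.Int.floordiv i plane])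

-- ===== PRECONDITION & SPEC =====
-- Pre_ excludes block triples with a negative count whose product is positive (exactly two negatives):
-- block counts are naturally nonnegative, and on such triples A's empty result is only an accident of empty range().
def Pre_calculate_offsets (blocks : Int × Int × Int) (chunk_size : Int × Int × Int) : Prop :=
  (0 ≤ blocks.1 ∧ 0 ≤ blocks.2.1 ∧ 0 ≤ blocks.2.2) ∨ blocks.1 * (blocks.2.1 * blocks.2.2) ≤ 0
instance (blocks : Int × Int × Int) (chunk_size : Int × Int × Int) : Decidable (Pre_calculate_offsets blocks chunk_size) := by unfold Pre_calculate_offsets; infer_instance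
def pvWitness_calculate_offsets : (Int × Int × Int) × (Int × Int × Int) := ((2, 1, 3), (10, 20, 30))

def Spec_calculate_offsets (blocks : Int × Int × Int) (chunk_size : Int × Int × Int) (out : List (List Int)) : Prop := out = calculate_offsets_alt blocks chunk_size
instance (blocks : Int × Int × Int) (chunk_size : Int × Int × Int) (out : List (List Int)) : Decidable (Spec_calculate_offsets blocks chunk_size out) := by unfold Spec_calculate_offsets; infer_instance

-- ===== CLAIM =====
def Claim_equal_calculate_offsets : Prop := ∀ (blocks : Int × Int × Int) (chunk_size : Int × Int × Int), Dom_calculate_offsets blocks chunk_size → Pre_calculate_offsets blocks chunk_size → Spec_calculate_offsets blocks chunk_size (calculate_offsets blocks chunk_size)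

-- ===== LEMMAS AND PROOFS =====

theorem flatMap_single {a b : Type} (l : List a) (f : a -> b) :
    l.flatMap (fun x => [f x]) = l.map f := by
  induction l with
  | nil => rfl
  | cons h t ih => simp [ih]

theorem flatMap_range_map_eq {α : Type} (n1 n2 : Nat) (f : Nat → Nat → α) :
    (List.range n1).flatMap (fun ap => (List.range n2).map (fun ml => f ap ml))
      = (List.range (n1 * n2)).map (fun j => f (j / n2) (j % n2)) := by
  induction n1 with
  | zero => simp
  | succ n ih =>
    rw [List.range_succ, List.flatMap_append, ih, Nat.succ_mul, List.range_add, List.map_append,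
      List.map_map]
    congr 1
    simp only [List.flatMap_cons, List.flatMap_nil, List.append_nil]
    apply List.map_congr_left
    intro x hx
    have hx' := List.mem_range.mp hx
    have h2 : 0 < n2 := Nat.pos_of_ne_zero (by omega)
    have e : n * n2 + x = x + n2 * n := by ring
    simp only [Function.comp, e, Nat.add_mul_div_left _ _ h2, Nat.add_mul_mod_self_left,
      Nat.div_eq_of_lt hx', Nat.mod_eq_of_lt hx', Nat.zero_add]

theorem flatMap3_eq {α : Type} (n0 n1 n2 : Nat) (f : Nat → Nat → Nat → α) :
    (List.range n0).flatMap (fun dv => (List.range n1).flatMap (fun ap =>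
        (List.range n2).map (fun ml => f dv ap ml)))
      = (List.range (n0 * (n1 * n2))).map (fun i => f (i / (n1 * n2)) (i / n2 % n1) (i % n2)) := by
  have h1 : ∀ dv, (List.range n1).flatMap (fun ap => (List.range n2).map (fun ml => f dv ap ml))
      = (List.range (n1 * n2)).map (fun j => f dv (j / n2) (j % n2)) := fun dv =>
    flatMap_range_map_eq n1 n2 (fun a m => f dv a m)
  simp only [h1]
  rw [flatMap_range_map_eq n0 (n1 * n2) (fun dv j => f dv (j / n2) (j % n2))]
  apply List.map_congr_left
  intro i hi
  have hi' := List.mem_range.mp hi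
  congr 1
  · rw [mul_comm n1 n2, Nat.mod_mul_right_div_self]
  · exact Nat.mod_mod_of_dvd i ⟨n1, mul_comm n1 n2⟩

theorem foldl_const {α β : Type} (l : List β) (init : α) :
    l.foldl (fun a _ => a) init = init := by
  induction l generalizing init with
  | nil => rfl
  | cons h t ih => simp [List.foldl, ih]

-- ===== VERDICT =====
theorem calculate_offsets_spec : Claim_equal_calculate_offsets := by
  intro blocks chunk_size _ hpre
  unfold Spec_calculate_offsets
  obtain ⟨b0, b1, b2⟩ := blocks
  obtain ⟨c0, c1, c2⟩ := chunk_size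
  by_cases hall : 0 ≤ b0 ∧ 0 ≤ b1 ∧ 0 ≤ b2
  case neg =>
    have hprod : b0 * (b1 * b2) ≤ 0 := by
      rcases hpre with h | h
      · exact absurd h hall
      · exact h
    have hB : calculate_offsets_alt (b0, b1, b2) (c0, c1, c2) = [] := by
      show (PySem.List.pyRange 0 (b0 * (b1 * b2)) 1).map _ = []
      rw [PySem.List.pyRange_one_eq_nil hprod]
      rfl
    rw [hB]
    unfold calculate_offsets
    rcases not_and_or.mp hall with h0 | h12
    · rw [PySem.List.pyRange_one_eq_nil (by omega : b0 ≤ 0)]; rfl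
    rcases not_and_or.mp h12 with h1 | h2
    · simp only [PySem.List.pyRange_one_eq_nil (show b1 ≤ 0 by omega), List.foldl_nil, foldl_const]
    · simp only [PySem.List.pyRange_one_eq_nil (show b2 ≤ 0 by omega), List.foldl_nil, foldl_const]
  obtain ⟨h0, h1, h2⟩ := hall
  unfold calculate_offsets calculate_offsets_alt
  simp only [PySem.List.foldl_append_eq_flatMap, List.nil_append]
  rw [show b0 = ((b0.toNat : Nat) : Int) from (Int.toNat_of_nonneg h0).symm,
      show b1 = ((b1.toNat : Nat) : Int) from (Int.toNat_of_nonneg h1).symm,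
      show b2 = ((b2.toNat : Nat) : Int) from (Int.toNat_of_nonneg h2).symm]
  rw [show ((b0.toNat : Int) * ((b1.toNat : Int) * (b2.toNat : Int))) = ((b0.toNat * (b1.toNat * b2.toNat) : Nat) : Int) by push_cast; ring]
  rw [PySem.List.pyRange_zero b0.toNat, PySem.List.pyRange_zero b1.toNat, PySem.List.pyRange_zero b2.toNat,
    PySem.List.pyRange_zero_nat]
  simp only [List.flatMap_map, List.map_map, Function.comp_def, flatMap_single]
  simp only [← Nat.cast_mul, PySem.Int.mod_natCast, PySem.Int.floordiv_natCast]
  exact flatMap3_eq b0.toNat b1.toNat b2.toNat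
    (fun dv ap ml => [c2 * (ml : Int), c1 * (ap : Int), c0 * (dv : Int)])
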